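-- pv_equiv track=rewrite | github.com/ankit1321/-ankit1321-Emotion_detection_website | utils.py | handle_negation
-- ===== SOURCE A (Python) =====
-- negation_words = ["not", "no", "never", "n't", "cannot"]
--
-- def handle_negation(tokens):
--     modified_tokens = []
--     negate = False
--     for i, token in enumerate(tokens):
--         if token in negation_words:
--             negate = True
--         elif negate:
--             if token in ["only", "just", "very", "much"]:
--                 modified_tokens.append(token)
--             else:
--                 modified_tokens.append(token + "_NEG")
--                 negate = False
--         else:
--             modified_tokens.append(token)
--     return modified_tokens
-- ===== SOURCE B (Python) =====
-- negation_words = ["not", "no", "never", "n't", "cannot"]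
-- intensifiers = ["only", "just", "very", "much"]
--
-- def handle_negation(tokens):
--     out = []
--     i = 0
--     n = len(tokens)
--     while i < n:
--         if tokens[i] not in negation_words:
--             out.append(tokens[i])
--             i += 1
--         else:
--             i += 1
--             while i < n and tokens[i] in intensifiers and tokens[i] not in negation_words:
--                 out.append(tokens[i])
--                 i += 1
--             if i < n and tokens[i] not in negation_words:
--                 out.append(tokens[i] + "_NEG")
--                 i += 1
--             # if it stopped on a negation word, the outer loop re-handles it
--     return out
-- ===== Notes on version B (the rewrite author's own statement) =====
-- stated objective: alternative
-- what changed: Replaces A's enumerate-loop with a 'negate' boolean flag by an index-based two-level while loop: the outer loop copies tokens, and on a negation word an inner loop consumes the intensifier run and then tags the next non-negation token with _NEG, with no flag state.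
import Mathlib
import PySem

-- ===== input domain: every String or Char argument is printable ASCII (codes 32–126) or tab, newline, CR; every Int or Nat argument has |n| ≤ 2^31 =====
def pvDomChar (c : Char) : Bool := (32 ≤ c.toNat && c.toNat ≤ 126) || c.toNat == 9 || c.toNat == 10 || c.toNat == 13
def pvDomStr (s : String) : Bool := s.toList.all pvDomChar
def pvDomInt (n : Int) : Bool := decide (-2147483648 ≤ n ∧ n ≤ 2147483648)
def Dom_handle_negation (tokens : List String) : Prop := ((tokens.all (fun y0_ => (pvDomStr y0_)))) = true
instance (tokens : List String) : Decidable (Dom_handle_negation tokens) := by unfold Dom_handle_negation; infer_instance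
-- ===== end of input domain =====

-- B replaces A's single loop with a 'negate' flag by an index-based two-level while loop (outer copy loop,
-- inner loop per negation word); same cost, different decomposition. Proven to return the same list.

-- ===== PORT A =====
def negationWords : List String := ["not", "no", "never", "n't", "cannot"]

-- loop body of A: state (modified_tokens, negate)
def aStep (st : List String × Bool) (token : String) : List String × Bool :=
  if token ∈ negationWords then (st.1, true)
  else if st.2 then
    (if token ∈ ["only", "just", "very", "much"] then (st.1 ++ [token], st.2)
     else (st.1 ++ [token ++ "_NEG"], false))
  else (st.1 ++ [token], st.2)

def handle_negation (tokens : List String) : List String :=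
  (tokens.foldl aStep ([], false)).1

-- ===== PORT B =====
def intensifiers : List String := ["only", "just", "very", "much"]

mutual
-- outer while loop of B
def bOuter : List String → List String
  | [] => []
  | t :: rest => if t ∈ negationWords then bNeg rest else t :: bOuter rest
-- inner loop after a negation word (a negation word encountered here is re-handled,
-- i.e. the outer loop's negation branch runs again: bNeg continues)
def bNeg : List String → List String
  | [] => []
  | t :: rest =>
      if t ∈ intensifiers ∧ t ∉ negationWords then t :: bNeg rest
      else if t ∈ negationWords then bNeg rest
      else (t ++ "_NEG") :: bOuter rest
end

def handle_negation_alt (tokens : List String) : List String := bOuter tokens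

-- ===== PRECONDITION & SPEC =====
def Spec_handle_negation (tokens : List String) (out : List String) : Prop := out = handle_negation_alt tokens
instance (tokens : List String) (out : List String) : Decidable (Spec_handle_negation tokens out) := by unfold Spec_handle_negation; infer_instance

-- ===== CLAIM (what is proved, stated in full; the proofs are below) =====
def Claim_equal_handle_negation : Prop := ∀ (tokens : List String), Dom_handle_negation tokens → Spec_handle_negation tokens (handle_negation tokens)

-- ===== LEMMAS AND PROOFS =====

-- loop invariant: A's fold from (acc, false) produces acc ++ bOuter ts, and from (acc, true) acc ++ bNeg ts
theorem foldl_aStep_eq (ts : List String) : ∀ acc : List String,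
    (ts.foldl aStep (acc, false)).1 = acc ++ bOuter ts ∧
    (ts.foldl aStep (acc, true)).1 = acc ++ bNeg ts := by
  induction ts with
  | nil => intro acc; simp [bOuter, bNeg]
  | cons t rest ih =>
    intro acc
    constructor
    · by_cases h : t ∈ negationWords
      · simp [List.foldl, aStep, h, bOuter, (ih acc).2]
      · simp [List.foldl, aStep, h, bOuter, (ih (acc ++ [t])).1]
    · by_cases h : t ∈ negationWords
      · simp [List.foldl, aStep, h, bNeg, (ih acc).2]
      · by_cases hi : t ∈ intensifiers
        · have hi' : t ∈ ["only", "just", "very", "much"] := hi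
          simp [List.foldl, aStep, h, hi', bNeg, hi, (ih (acc ++ [t])).2]
        · have hi' : t ∉ ["only", "just", "very", "much"] := hi
          simp [List.foldl, aStep, h, hi', bNeg, hi, (ih (acc ++ [t ++ "_NEG"])).1]

-- ===== VERDICT (by name: the statement is the Claim_ definition above) =====
theorem handle_negation_spec : Claim_equal_handle_negation := by
  intro tokens _
  unfold Spec_handle_negation handle_negation handle_negation_alt
  simpa using (foldl_aStep_eq tokens []).1
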